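-- pv_equiv track=rewrite | github.com/Fondamenti18/fondamenti-di-programmazione | students/1823149/homework02/program03.py | destruttura
-- ===== SOURCE A (Python) =====
-- def destruttura(cod):
--     lista_codice=[]
--     for i in cod:
--         lista_codice.append(i)
--     #print (lista_codice)
--     dizionario_codice=dict()
--     posizioni_car=[]
--     i=0
--     for c in enumerate(lista_codice):
--         if c[1] in dizionario_codice.keys():
--             dizionario_codice[c[1]].append(c[0])
--         else:
--             dizionario_codice[c[1]]=[c[0]]
--     return dizionario_codice
-- ===== SOURCE B (Python) =====
-- def destruttura(cod):
--     seen = []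
--     for c in cod:
--         if c not in seen:
--             seen.append(c)
--     return {c: [i for i, ch in enumerate(cod) if ch == c] for c in seen}
-- ===== Notes on version B (the rewrite author's own statement) =====
-- stated objective: alternative
-- what changed: B replaces A's single-pass dict accumulation (append-or-insert per position) with a two-phase grouping: first dedup the characters in first-occurrence order, then build each character's position list by its own enumerate-filter comprehension.
import Mathlib
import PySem

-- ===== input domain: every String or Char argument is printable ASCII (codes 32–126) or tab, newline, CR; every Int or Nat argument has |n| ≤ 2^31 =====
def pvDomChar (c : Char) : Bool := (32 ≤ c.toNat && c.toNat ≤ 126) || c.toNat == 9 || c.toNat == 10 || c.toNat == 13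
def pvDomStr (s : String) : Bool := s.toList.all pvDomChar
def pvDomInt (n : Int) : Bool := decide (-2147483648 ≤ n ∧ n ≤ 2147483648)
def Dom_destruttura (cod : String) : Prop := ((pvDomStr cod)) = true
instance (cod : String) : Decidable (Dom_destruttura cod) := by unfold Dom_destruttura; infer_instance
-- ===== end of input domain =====

-- B groups by first computing the distinct characters (first-occurrence order) and then
-- scanning enumerate(cod) once per character, instead of A's single-pass dict accumulation.

-- ===== PORT A =====
def destruttura (cod : String) : List (String × List Int) :=
  let lista_codice : List Char := cod.toList.foldl (fun acc i => acc ++ [i]) []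
  let dizionario_codice : PySem.Dict String (List Int) :=
    (PySem.List.enumerate lista_codice 0).foldl
      (fun d c =>
        if d.contains (String.ofList [c.2]) then
          d.modify (String.ofList [c.2]) [] (fun l => l ++ [c.1])
        else
          d.insert (String.ofList [c.2]) [c.1])
      PySem.Dict.empty
  dizionario_codice.items

-- ===== PORT B =====
def destruttura_alt (cod : String) : List (String × List Int) :=
  let seen : List String :=
    cod.toList.foldl
      (fun acc c => if (String.ofList [c]) ∈ acc then acc else acc ++ [String.ofList [c]]) []
  seen.map (fun s =>
    (s, ((PySem.List.enumerate cod.toList 0).filter (fun p => String.ofList [p.2] == s)).map (·.1)))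

-- ===== PRECONDITION & SPEC =====
def Spec_destruttura (cod : String) (out : List (String × List Int)) : Prop := out = destruttura_alt cod
instance (cod : String) (out : List (String × List Int)) : Decidable (Spec_destruttura cod out) := by unfold Spec_destruttura; infer_instance

-- ===== CLAIM (what is proved, stated in full; the proofs are below) =====
def Claim_equal_destruttura : Prop := ∀ (cod : String), Dom_destruttura cod → Spec_destruttura cod (destruttura cod)

-- ===== LEMMAS AND PROOFS =====

theorem pv_foldl_append (l : List Char) (acc : List Char) :
    l.foldl (fun a i => a ++ [i]) acc = acc ++ l := by
  induction l generalizing acc with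
  | nil => simp
  | cons x xs ih => simp [List.foldl_cons, ih, List.append_assoc]

-- A's branchy step is exactly a `modify` with default [].
theorem pv_stepA_eq_modify (d : PySem.Dict String (List Int)) (c : Int × Char) :
    (if d.contains (String.ofList [c.2]) then
       d.modify (String.ofList [c.2]) [] (fun l => l ++ [c.1])
     else
       d.insert (String.ofList [c.2]) [c.1]) =
    d.modify (String.ofList [c.2]) [] (fun l => l ++ [c.1]) := by
  by_cases h : d.contains (String.ofList [c.2]) = true
  · simp [h]
  · have h0 : d.getD (String.ofList [c.2]) [] = [] :=
      PySem.Dict.getD_of_not_contains d [] (by simpa using h)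
    simp [h, PySem.Dict.modify, h0]

theorem pv_items_eq_keys_map (d : PySem.Dict String (List Int)) (h : d.keys.Nodup) :
    d.items = d.keys.map (fun k => (k, d.getD k [])) := by
  have : d.keys.map (fun k => (k, d.getD k [])) =
      d.items.map (fun p => (p.1, d.getD p.1 [])) := by
    simp [PySem.Dict.keys, List.map_map, Function.comp]
  rw [this]
  conv_lhs => rw [show d.items = d.items.map id from (List.map_id _).symm]
  apply List.map_congr_left
  intro p hp
  have hp' : (p.1, p.2) ∈ d.items := by simpa using hp
  have h2 := PySem.Dict.getD_of_get?_eq_some d [] (PySem.Dict.get?_of_mem_items d hp' h)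
  rw [h2]
  simp

theorem pv_seen_eq (cod : String) :
    cod.toList.foldl
      (fun acc c => if (String.ofList [c]) ∈ acc then acc else acc ++ [String.ofList [c]]) [] =
    PySem.Set.ofList (cod.toList.map (fun c => String.ofList [c])) := by
  rw [PySem.Set.ofList_eq_foldl, List.foldl_map]
  apply PySem.List.foldl_congr_mem
  intro a c _
  by_cases h : (String.ofList [c]) ∈ a
  · simp [PySem.Set.add, h]
  · simp [PySem.Set.add, h]

-- ===== VERDICT (by name: the statement is the Claim_ definition above) =====
theorem destruttura_spec : Claim_equal_destruttura := by
  intro cod _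
  unfold Spec_destruttura destruttura destruttura_alt
  simp only [pv_foldl_append, List.nil_append]
  set l := PySem.List.enumerate cod.toList 0 with hl
  set key : Int × Char → String := fun p => String.ofList [p.2] with hkey
  have hstep :
      l.foldl (fun d c =>
        if d.contains (String.ofList [c.2]) then
          d.modify (String.ofList [c.2]) [] (fun l => l ++ [c.1])
        else
          d.insert (String.ofList [c.2]) [c.1]) PySem.Dict.empty =
      l.foldl (fun d c => d.modify (key c) [] (fun l => l ++ [c.1])) PySem.Dict.empty := by
    apply PySem.List.foldl_congr_mem
    intro d c _
    exact pv_stepA_eq_modify d c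
  rw [hstep]
  set dA := l.foldl (fun d c => d.modify (key c) [] (fun l => l ++ [c.1])) PySem.Dict.empty with hdA
  have hnodup : dA.keys.Nodup := by
    rw [hdA]
    exact PySem.Dict.nodup_keys_foldl_modify_key l key [] (fun _ c => (fun l => l ++ [c.1]))
      PySem.Dict.empty (by simp)
  have hkeys : dA.keys = cod.toList.foldl
      (fun acc c => if (String.ofList [c]) ∈ acc then acc else acc ++ [String.ofList [c]]) [] := by
    rw [pv_seen_eq, hdA]
    rw [PySem.Dict.keys_foldl_modify_key]
    have : l.map key = cod.toList.map (fun c => String.ofList [c]) := by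
      have := PySem.List.map_snd_enumerate cod.toList 0
      calc l.map key = (l.map (·.2)).map (fun c => String.ofList [c]) := by
            simp [List.map_map, Function.comp, hkey]
        _ = cod.toList.map (fun c => String.ofList [c]) := by rw [this]
    rw [this]
    simp [PySem.Set.update, PySem.Set.ofList_eq_foldl, PySem.Dict.keys_empty]
  have hgetD : ∀ s : String, dA.getD s [] = (l.filter (fun p => String.ofList [p.2] == s)).map (·.1) := by
    intro s
    rw [hdA]
    have hmap : l.foldl (fun d c => d.modify (key c) [] (fun l => l ++ [c.1])) PySem.Dict.empty =
        (l.map (fun p => (key p, p.1))).foldl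
          (fun d q => d.modify q.1 [] (fun l => l ++ [q.2])) PySem.Dict.empty := by
      rw [List.foldl_map]
    rw [hmap, PySem.Dict.getD_foldl_modify_append, PySem.Dict.getD_empty]
    simp [List.filter_map, List.map_map, Function.comp_def, hkey]
  rw [pv_items_eq_keys_map dA hnodup, hkeys]
  apply List.map_congr_left
  intro s _
  rw [hgetD s]
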